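-- pv_equiv track=rewrite | github.com/inkstitch/inkstitch | lib/stitches/auto_run.py | add_path_attribs
-- ===== SOURCE A (Python) =====
-- def add_path_attribs(path):
--     # find_path() will have duplicated some of the edges in the graph.  We don't
--     # want to sew the same running stitch twice.  If a running stitch section appears
--     # twice in the path, we'll sew the first occurrence as a simple running stitch without
--     # the original running stitch repetitions and bean stitch settings.
--     seen = set()
--     for i, point in reversed(list(enumerate(path))):
--         if point in seen:
--             path[i] = (*point, "underpath")
--         else:
--             path[i] = (*point, "autorun")
--             seen.add(point)
--             seen.add((point[1], point[0]))
--     return path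
-- ===== SOURCE B (Python) =====
-- def add_path_attribs(path):
--     # Two forward passes with a last-occurrence table keyed by the unordered
--     # edge endpoints, instead of the original reverse scan with a seen-set.
--     last = {}
--     for i, (a, b) in enumerate(path):
--         last[(a, b) if a <= b else (b, a)] = i
--     for i, (a, b) in enumerate(path):
--         key = (a, b) if a <= b else (b, a)
--         path[i] = (a, b, "autorun" if last[key] == i else "underpath")
--     return path
-- ===== Notes on version B (the rewrite author's own statement) =====
-- stated objective: alternative
-- what changed: Replaces the reverse scan with an incrementally grown seen-set (storing both orientations of each point) by two forward passes: build a dict mapping each canonical (sorted) endpoint pair to its last index, then label position i autorun iff i is that last index.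
import Mathlib
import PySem

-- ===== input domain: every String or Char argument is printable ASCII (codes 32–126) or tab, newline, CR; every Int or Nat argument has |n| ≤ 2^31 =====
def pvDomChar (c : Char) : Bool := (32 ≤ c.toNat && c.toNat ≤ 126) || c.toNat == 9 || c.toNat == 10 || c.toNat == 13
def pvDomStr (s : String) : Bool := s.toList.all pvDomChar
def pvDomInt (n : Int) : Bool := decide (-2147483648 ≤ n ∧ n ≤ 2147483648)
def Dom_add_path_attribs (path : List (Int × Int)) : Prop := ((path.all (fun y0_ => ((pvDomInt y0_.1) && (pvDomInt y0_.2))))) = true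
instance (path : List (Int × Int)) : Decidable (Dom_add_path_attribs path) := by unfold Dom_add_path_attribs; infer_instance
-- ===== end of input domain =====

-- B replaces A's reverse scan with a seen-set by two forward passes over a
-- last-occurrence dict keyed by the sorted endpoint pair (alternative decomposition,
-- same asymptotic cost). Both Pythons mutate `path` in place; the theorem is about
-- the returned value (B performs the same mutation).


-- ===== PORT A =====
-- one loop iteration of A: test `point in seen`, write the labelled triple (the
-- in-place `path[i] = …` of the reverse scan is modelled by consing onto the
-- already-produced suffix), extend `seen` with both orientations
def stepA (st : List (Int × Int × String) × PySem.Set (Int × Int)) (ip : Int × (Int × Int)) :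
    List (Int × Int × String) × PySem.Set (Int × Int) :=
  let point := ip.2
  if PySem.Set.contains st.2 point then
    ((point.1, point.2, "underpath") :: st.1, st.2)
  else
    ((point.1, point.2, "autorun") :: st.1,
      PySem.Set.add (PySem.Set.add st.2 point) (point.2, point.1))

def add_path_attribs (path : List (Int × Int)) : List (Int × Int × String) :=
  ((PySem.List.enumerate path).reverse.foldl stepA ([], PySem.Set.empty)).1

-- ===== PORT B =====
-- canonical key:  (a, b) if a <= b else (b, a)
def pvKey (p : Int × Int) : Int × Int := if p.1 ≤ p.2 then p else (p.2, p.1)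

def add_path_attribs_alt (path : List (Int × Int)) : List (Int × Int × String) :=
  let last := (PySem.List.enumerate path).foldl
    (fun d ip => d.insert (pvKey ip.2) ip.1) (PySem.Dict.empty)
  (PySem.List.enumerate path).map (fun ip =>
    (ip.2.1, ip.2.2, if last.get? (pvKey ip.2) == some ip.1 then "autorun" else "underpath"))

-- ===== PRECONDITION & SPEC =====
def Spec_add_path_attribs (path : List (Int × Int)) (out : List (Int × Int × String)) : Prop := out = add_path_attribs_alt path
instance (path : List (Int × Int)) (out : List (Int × Int × String)) : Decidable (Spec_add_path_attribs path out) := by unfold Spec_add_path_attribs; infer_instance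

-- ===== CLAIM (what is proved, stated in full; the proofs are below) =====
def Claim_equal_add_path_attribs : Prop := ∀ (path : List (Int × Int)), Dom_add_path_attribs path → Spec_add_path_attribs path (add_path_attribs path)

-- ===== LEMMAS AND PROOFS =====

-- the common reference form: label = autorun iff no LATER element has the same key
def markList : List (Int × Int) → List (Int × Int × String)
  | [] => []
  | x :: xs =>
      (x.1, x.2, if xs.any (fun q => pvKey q == pvKey x) then "underpath" else "autorun") :: markList xs

theorem pvKey_eq_iff (q p : Int × Int) : pvKey q = pvKey p ↔ (p = q ∨ p = (q.2, q.1)) := by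
  obtain ⟨a, b⟩ := q; obtain ⟨c, d⟩ := p
  simp only [pvKey, Prod.ext_iff]
  split_ifs <;> constructor <;> intro h <;> omega

theorem contains_add_eq {α : Type} [BEq α] [LawfulBEq α] (s : PySem.Set α) (y p : α) :
    PySem.Set.contains (PySem.Set.add s y) p = (PySem.Set.contains s p || p == y) := by
  apply Bool.eq_iff_iff.mpr
  simp only [Bool.or_eq_true, PySem.Set.contains_iff, PySem.Set.mem_add, beq_iff_eq]

theorem beq_pair_key (x p : Int × Int) :
    (p == x || p == (x.2, x.1)) = (pvKey x == pvKey p) := by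
  apply Bool.eq_iff_iff.mpr
  simp only [Bool.or_eq_true, beq_iff_eq, pvKey_eq_iff]

-- ---- A = markList ----

-- A's labels relative to an arbitrary already-seen prefix `prev`
def markP (prev : List (Int × Int)) : List (Int × (Int × Int)) → List (Int × Int × String)
  | [] => []
  | x :: xs =>
      (x.2.1, x.2.2,
        if (prev.any (fun q => pvKey q == pvKey x.2) || xs.any (fun q => pvKey q.2 == pvKey x.2))
        then "underpath" else "autorun") :: markP prev xs

theorem any_key_congr (prev : List (Int × Int)) {p p' : Int × Int} (h : pvKey p = pvKey p') :
    prev.any (fun q => pvKey q == pvKey p) = prev.any (fun q => pvKey q == pvKey p') := by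
  rw [h]

theorem foldA_spec (e : List (Int × (Int × Int))) :
    ∀ (prev : List (Int × Int)) (acc : List (Int × Int × String)) (s : PySem.Set (Int × Int)),
    (∀ p, PySem.Set.contains s p = prev.any (fun q => pvKey q == pvKey p)) →
    (e.reverse.foldl stepA (acc, s)).1 = markP prev e ++ acc
      ∧ ∀ p, PySem.Set.contains (e.reverse.foldl stepA (acc, s)).2 p
          = (prev.any (fun q => pvKey q == pvKey p) || e.any (fun q => pvKey q.2 == pvKey p)) := by
  induction e with
  | nil =>
      intro prev acc s hs
      constructor
      · simp [markP]
      · intro p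
        simp only [List.reverse_nil, List.foldl_nil, List.any_nil, Bool.or_false]
        exact hs p
  | cons x xs ih =>
      intro prev acc s hs
      rw [List.reverse_cons, List.foldl_append, List.foldl_cons, List.foldl_nil]
      obtain ⟨h1, h2⟩ := ih prev acc s hs
      simp only [stepA]
      rw [h2]
      by_cases hc : (prev.any (fun q => pvKey q == pvKey x.2)
          || xs.any (fun q => pvKey q.2 == pvKey x.2)) = true
      · rw [hc]
        refine ⟨?_, ?_⟩
        · simp only [if_true, markP, hc, List.cons_append, h1]
        · intro p
          simp only [if_true]
          rw [h2 p, List.any_cons]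
          by_cases hk : pvKey x.2 = pvKey p
          · have hprev := any_key_congr prev hk
            have hxs : xs.any (fun q => pvKey q.2 == pvKey x.2)
                = xs.any (fun q => pvKey q.2 == pvKey p) := by rw [hk]
            rw [← hprev, ← hxs]
            rw [← hprev, ← hxs] at *
            simp only [hk] at *
            cases hq1 : prev.any (fun q => pvKey q == pvKey x.2) <;>
              cases hq2 : xs.any (fun q => pvKey q.2 == pvKey x.2) <;>
                simp_all
          · have : (pvKey x.2 == pvKey p) = false := by simp [hk]
            rw [this]
            simp
      · rw [Bool.not_eq_true] at hc
        rw [hc]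
        simp only [Bool.false_eq_true, if_false]
        constructor
        · simp only [markP, hc, Bool.false_eq_true, if_false, List.cons_append, h1]
        · intro p
          rw [contains_add_eq, contains_add_eq, h2 p, List.any_cons]
          rw [Bool.or_assoc, beq_pair_key x.2 p]
          cases hq : (pvKey x.2 == pvKey p) <;>
            cases hp : prev.any (fun q => pvKey q == pvKey p) <;>
              cases hx : xs.any (fun q => pvKey q.2 == pvKey p) <;> simp

theorem any_enumerate_snd (p : Int × Int) (xs : List (Int × Int)) :
    ∀ s : Int, (PySem.List.enumerate xs s).any (fun q => pvKey q.2 == pvKey p)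
      = xs.any (fun q => pvKey q == pvKey p) := by
  induction xs with
  | nil => intro s; simp [PySem.List.enumerate_nil]
  | cons x xs ih => intro s; simp [PySem.List.enumerate_cons, List.any_cons, ih]

theorem markP_nil_enum (l : List (Int × Int)) :
    ∀ s : Int, markP [] (PySem.List.enumerate l s) = markList l := by
  induction l with
  | nil => intro s; simp [PySem.List.enumerate_nil, markP, markList]
  | cons x xs ih =>
      intro s
      rw [PySem.List.enumerate_cons]
      simp only [markP, markList, List.any_nil, Bool.false_or]
      rw [any_enumerate_snd, ih]

theorem A_eq_markList (l : List (Int × Int)) : add_path_attribs l = markList l := by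
  unfold add_path_attribs
  have hs : ∀ p : Int × Int, PySem.Set.contains (PySem.Set.empty : PySem.Set (Int × Int)) p
      = ([] : List (Int × Int)).any (fun q => pvKey q == pvKey p) := by
    intro p; simp [PySem.Set.empty, PySem.Set.contains]
  have h := (foldA_spec (PySem.List.enumerate l 0) [] [] PySem.Set.empty hs).1
  rw [h, List.append_nil, markP_nil_enum]

-- ---- B = markList ----

-- index (as stored in the dict) of the LAST entry of e whose key is k
def posIdxE : List (Int × (Int × Int)) → (Int × Int) → Option Int
  | [], _ => none
  | x :: xs, k =>
      match posIdxE xs k with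
      | some i => some i
      | none => if pvKey x.2 == k then some x.1 else none

-- index in l of the LAST element whose key is k
def posN : List (Int × Int) → (Int × Int) → Option Nat
  | [], _ => none
  | x :: xs, k =>
      match posN xs k with
      | some n => some (n + 1)
      | none => if pvKey x == k then some 0 else none

theorem dict_fold_get? (e : List (Int × (Int × Int))) :
    ∀ (d : PySem.Dict (Int × Int) Int) (k : Int × Int),
    (e.foldl (fun d ip => d.insert (pvKey ip.2) ip.1) d).get? k
      = match posIdxE e k with
        | some i => some i
        | none => d.get? k := by
  induction e with
  | nil => intro d k; simp [posIdxE]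
  | cons x xs ih =>
      intro d k
      rw [List.foldl_cons, ih]
      simp only [posIdxE]
      cases posIdxE xs k with
      | some i => rfl
      | none =>
          rw [PySem.Dict.get?_insert]
          by_cases hk : k = pvKey x.2
          · simp [hk]
          · have : (pvKey x.2 == k) = false := by simp [Ne.symm hk]
            simp [hk, this]

theorem posIdxE_enum (l : List (Int × Int)) :
    ∀ (s : Int) (k : Int × Int),
    posIdxE (PySem.List.enumerate l s) k
      = Option.map (fun n : Nat => s + (n : Int)) (posN l k) := by
  induction l with
  | nil => intro s k; simp [PySem.List.enumerate_nil, posIdxE, posN]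
  | cons x xs ih =>
      intro s k
      rw [PySem.List.enumerate_cons]
      simp only [posIdxE, posN, ih (s + 1) k]
      cases posN xs k with
      | some n =>
          simp only [Option.map_some]
          congr 1
          push_cast
          ring
      | none =>
          simp only [Option.map_none]
          by_cases hk : (pvKey x == k) = true <;> simp [hk]

theorem posN_none_iff (l : List (Int × Int)) (k : Int × Int) :
    posN l k = none ↔ l.any (fun q => pvKey q == k) = false := by
  induction l with
  | nil => simp [posN]
  | cons x xs ih =>
      simp only [posN, List.any_cons, Bool.or_eq_false_iff]
      cases h : posN xs k with
      | some n =>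
          have hx : (xs.any fun q => pvKey q == k) ≠ false := by
            intro hf
            rw [← ih] at hf
            rw [hf] at h
            cases h
          refine ⟨fun hc => by simp at hc, fun hc => absurd hc.2 hx⟩
      | none =>
          have hx := ih.mp h
          by_cases hk : (pvKey x == k) = true <;> simp [hk, hx]

theorem posN_self (l : List (Int × Int)) :
    ∀ (i : Nat) (h : i < l.length),
    (posN l (pvKey l[i]) = some i)
      ↔ ((l.drop (i + 1)).any (fun q => pvKey q == pvKey l[i]) = false) := by
  induction l with
  | nil => intro i h; simp at h
  | cons x xs ih =>
      intro i h
      cases i with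
      | zero =>
          simp only [List.getElem_cons_zero, List.drop_succ_cons, List.drop_zero, posN]
          cases hp : posN xs (pvKey x) with
          | none =>
              have hx := (posN_none_iff xs (pvKey x)).mp hp
              simp [hx]
          | some n =>
              have hx : ¬ (xs.any (fun q => pvKey q == pvKey x) = false) := by
                intro hf
                have := (posN_none_iff xs (pvKey x)).mpr hf
                rw [this] at hp
                cases hp
              refine ⟨fun hc => by simp at hc, fun hc => absurd hc hx⟩
      | succ j =>
          have hj : j < xs.length := by simpa using h
          simp only [List.getElem_cons_succ, List.drop_succ_cons, posN]
          cases hp : posN xs (pvKey xs[j]) with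
          | none =>
              exfalso
              have hx := (posN_none_iff xs (pvKey xs[j])).mp hp
              have : xs.any (fun q => pvKey q == pvKey xs[j]) = true := by
                rw [List.any_eq_true]
                exact ⟨xs[j], List.getElem_mem hj, by simp⟩
              simp [this] at hx
          | some n =>
              have := ih j hj
              rw [hp] at this
              constructor
              · intro hc
                have hn : n = j := by simpa using hc
                exact this.mp (by rw [hn])
              · intro hc
                have := this.mpr hc
                simp at this
                simp [this]

theorem length_markList (l : List (Int × Int)) : (markList l).length = l.length := by
  induction l with
  | nil => rfl
  | cons x xs ih => simp [markList, ih]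

theorem markList_getElem (l : List (Int × Int)) :
    ∀ (i : Nat) (h : i < l.length),
    (markList l)[i]'(by rw [length_markList]; exact h)
      = (l[i].1, l[i].2,
          if (l.drop (i + 1)).any (fun q => pvKey q == pvKey l[i]) then "underpath" else "autorun") := by
  induction l with
  | nil => intro i h; simp at h
  | cons x xs ih =>
      intro i h
      cases i with
      | zero => simp [markList]
      | succ j =>
          have hj : j < xs.length := by simpa using h
          simp only [markList, List.getElem_cons_succ, List.drop_succ_cons]
          exact ih j hj

theorem B_eq_markList (l : List (Int × Int)) : add_path_attribs_alt l = markList l := by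
  unfold add_path_attribs_alt
  apply List.ext_getElem
  · simp [length_markList, PySem.List.length_enumerate]
  intro i h1 h2
  rw [List.getElem_map, markList_getElem l i (by rwa [length_markList] at h2)]
  rw [PySem.List.getElem_enumerate]
  simp only []
  rw [dict_fold_get?, posIdxE_enum]
  have hlen : i < l.length := by rwa [length_markList] at h2
  cases hp : posN l (pvKey l[i]) with
  | none =>
      exfalso
      have hx := (posN_none_iff l (pvKey l[i])).mp hp
      have : l.any (fun q => pvKey q == pvKey l[i]) = true := by
        rw [List.any_eq_true]
        exact ⟨l[i], List.getElem_mem hlen, by simp⟩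
      simp [this] at hx
  | some n =>
      simp only [Option.map_some]
      have hps := posN_self l i hlen
      rw [hp] at hps
      by_cases hd : (l.drop (i + 1)).any (fun q => pvKey q == pvKey l[i]) = true
      · have hni : ¬ (n = i) := by
          intro hni
          have := hps.mp (by rw [hni])
          simp [hd] at this
        have : (some ((0 : Int) + (n : Int)) == some ((0 : Int) + (i : Int))) = false := by
          simp only [beq_eq_false_iff_ne, ne_eq, Option.some.injEq]
          omega
        simpa [hd, this] using hni
      · rw [Bool.not_eq_true] at hd
        have hni : n = i := by
          have := hps.mpr hd
          simpa using this
        simp [hd, hni]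

-- ===== VERDICT (by name: the statement is the Claim_ definition above) =====
theorem add_path_attribs_spec : Claim_equal_add_path_attribs := by
  intro path _
  unfold Spec_add_path_attribs
  rw [A_eq_markList, B_eq_markList]
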